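-- pv_equiv track=rewrite | github.com/bajor/advent-of-code | day_3_part_1.py | is_touching_symbol
-- ===== SOURCE A (Python) =====
-- def is_touching_symbol(possible_symbol_positions, symbol_positions):
--     rows_to_check = list(possible_symbol_positions.keys())
--
--     for row in rows_to_check:
--         possible_positions = possible_symbol_positions[row]
--         if row in symbol_positions:
--             positions = symbol_positions[row]
--         else:
--             positions = []
--         if set(possible_positions) & set(positions):
--             return True
--     return False
-- ===== SOURCE B (Python) =====
-- def is_touching_symbol(possible_symbol_positions, symbol_positions):
--     possible_set = {(row, col)
--                     for row, cols in possible_symbol_positions.items()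
--                     for col in cols}
--     symbol_set = {(row, col)
--                   for row, cols in symbol_positions.items()
--                   for col in cols}
--     return bool(possible_set & symbol_set)
-- ===== Notes on version B (the rewrite author's own statement) =====
-- stated objective: simpler
-- what changed: Replaces the per-row loop with its early return and per-row set intersections by two flat (row, col) coordinate sets built once from each dict and a single global set intersection.
import Mathlib
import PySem

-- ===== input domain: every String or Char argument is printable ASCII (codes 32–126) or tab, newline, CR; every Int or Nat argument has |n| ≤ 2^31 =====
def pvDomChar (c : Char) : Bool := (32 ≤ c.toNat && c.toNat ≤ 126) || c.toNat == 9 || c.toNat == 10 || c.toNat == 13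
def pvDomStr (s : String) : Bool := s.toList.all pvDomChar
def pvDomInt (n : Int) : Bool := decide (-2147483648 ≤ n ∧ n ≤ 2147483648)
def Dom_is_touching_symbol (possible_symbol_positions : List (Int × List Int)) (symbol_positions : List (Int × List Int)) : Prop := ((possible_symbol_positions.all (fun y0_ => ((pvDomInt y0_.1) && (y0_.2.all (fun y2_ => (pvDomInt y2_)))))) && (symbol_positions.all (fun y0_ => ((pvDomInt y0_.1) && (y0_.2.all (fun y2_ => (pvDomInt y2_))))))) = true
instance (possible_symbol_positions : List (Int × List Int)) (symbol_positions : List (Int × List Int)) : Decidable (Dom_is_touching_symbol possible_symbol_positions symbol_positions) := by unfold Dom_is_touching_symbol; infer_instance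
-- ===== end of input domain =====

-- ===== PORT A =====
-- B replaces the per-row loop by two flat (row, col) coordinate sets and one global intersection (objective: simpler).
-- The input assoc lists are dicts: each port starts with PySem.Dict.ofList (last occurrence of a key wins, as in Python).

-- for row in rows_to_check: possible = psp[row]; positions = sp[row] if row in sp else []; if set(possible) & set(positions): return True
-- psp[row] never raises here because row comes from psp.keys, so (get? row).getD [] is exact.
def isTouchLoop (d1 d2 : PySem.Dict Int (List Int)) : List Int → Bool
  | [] => false
  | row :: rest =>
      let possible := (d1.get? row).getD []
      let positions := if d2.contains row then d2.getD row [] else []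
      if ¬ (PySem.Set.inter (PySem.Set.ofList possible) (PySem.Set.ofList positions)).isEmpty then
        true
      else
        isTouchLoop d1 d2 rest

def is_touching_symbol (possible_symbol_positions : List (Int × List Int)) (symbol_positions : List (Int × List Int)) : Bool :=
  let d1 := PySem.Dict.ofList possible_symbol_positions
  let d2 := PySem.Dict.ofList symbol_positions
  isTouchLoop d1 d2 d1.keys

-- ===== PORT B =====
-- {(row, col) for row, cols in d.items() for col in cols}
def flatPairs (d : PySem.Dict Int (List Int)) : PySem.Set (Int × Int) :=
  PySem.Set.ofList (d.items.flatMap (fun p => p.2.map (fun c => (p.1, c))))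

def is_touching_symbol_alt (possible_symbol_positions : List (Int × List Int)) (symbol_positions : List (Int × List Int)) : Bool :=
  !(PySem.Set.inter (flatPairs (PySem.Dict.ofList possible_symbol_positions))
                    (flatPairs (PySem.Dict.ofList symbol_positions))).isEmpty

-- ===== PRECONDITION & SPEC =====
def Spec_is_touching_symbol (possible_symbol_positions : List (Int × List Int)) (symbol_positions : List (Int × List Int)) (out : Bool) : Prop := out = is_touching_symbol_alt possible_symbol_positions symbol_positions
instance (possible_symbol_positions : List (Int × List Int)) (symbol_positions : List (Int × List Int)) (out : Bool) : Decidable (Spec_is_touching_symbol possible_symbol_positions symbol_positions out) := by unfold Spec_is_touching_symbol; infer_instance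

-- ===== CLAIM (what is proved, stated in full; the proofs are below) =====
def Claim_equal_is_touching_symbol : Prop := ∀ (possible_symbol_positions : List (Int × List Int)) (symbol_positions : List (Int × List Int)), Dom_is_touching_symbol possible_symbol_positions symbol_positions → Spec_is_touching_symbol possible_symbol_positions symbol_positions (is_touching_symbol possible_symbol_positions symbol_positions)

-- ===== LEMMAS AND PROOFS =====

-- a nonempty set-intersection test is an existential
theorem inter_not_isEmpty_iff {α : Type} [BEq α] [LawfulBEq α] (s t : List α) :
    ((PySem.Set.inter (PySem.Set.ofList s) (PySem.Set.ofList t)).isEmpty = false) ↔ ∃ x, x ∈ s ∧ x ∈ t := by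
  rw [List.isEmpty_eq_false_iff_exists_mem]
  constructor
  · rintro ⟨x, hx⟩
    rw [PySem.Set.mem_inter] at hx
    exact ⟨x, (PySem.Set.mem_ofList _ _).1 hx.1, (PySem.Set.mem_ofList _ _).1 hx.2⟩
  · rintro ⟨x, h1, h2⟩
    exact ⟨x, (PySem.Set.mem_inter _ _ _).2
      ⟨(PySem.Set.mem_ofList _ _).2 h1, (PySem.Set.mem_ofList _ _).2 h2⟩⟩

-- the per-row test of A's loop body, as an existential over the two dict lookups
theorem rowTest_iff (d1 d2 : PySem.Dict Int (List Int)) (row : Int) :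
    ((PySem.Set.inter (PySem.Set.ofList ((d1.get? row).getD []))
        (PySem.Set.ofList (if d2.contains row then d2.getD row [] else []))).isEmpty = false) ↔
      ∃ c, c ∈ d1.getD row [] ∧ c ∈ d2.getD row [] := by
  rw [inter_not_isEmpty_iff, ← PySem.Dict.getD_eq_get?_getD]
  by_cases hc : d2.contains row
  · rw [if_pos hc]
  · rw [if_neg hc,
        PySem.Dict.getD_of_not_contains d2 [] (by simpa using hc)]

-- A's loop returns true iff some row in the list has a common position
theorem isTouchLoop_iff (d1 d2 : PySem.Dict Int (List Int)) (rows : List Int) :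
    isTouchLoop d1 d2 rows = true ↔
      ∃ row ∈ rows, ∃ c, c ∈ d1.getD row [] ∧ c ∈ d2.getD row [] := by
  induction rows with
  | nil => simp [isTouchLoop]
  | cons row rest ih =>
    simp only [isTouchLoop]
    by_cases h : (PySem.Set.inter (PySem.Set.ofList ((d1.get? row).getD []))
        (PySem.Set.ofList (if d2.contains row then d2.getD row [] else []))).isEmpty = false
    · rw [if_pos (by simp [h])]
      simp only [true_iff]
      obtain ⟨c, h1, h2⟩ := (rowTest_iff d1 d2 row).1 h
      exact ⟨row, List.mem_cons_self, c, h1, h2⟩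
    · rw [Bool.not_eq_false] at h
      rw [if_neg (by simp [h]), ih]
      constructor
      · rintro ⟨r, hr, hc⟩; exact ⟨r, List.mem_cons_of_mem _ hr, hc⟩
      · rintro ⟨r, hr, c, h1, h2⟩
        rcases List.mem_cons.1 hr with rfl | hr'
        · exfalso
          have := (rowTest_iff d1 d2 r).2 ⟨c, h1, h2⟩
          rw [h] at this; exact absurd this (by simp)
        · exact ⟨r, hr', c, h1, h2⟩

-- membership in the flat coordinate set of a dict with Nodup keys
theorem mem_flatPairs (d : PySem.Dict Int (List Int)) (hnd : d.keys.Nodup) (r c : Int) :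
    (r, c) ∈ flatPairs d ↔ c ∈ d.getD r [] := by
  unfold flatPairs
  rw [PySem.Set.mem_ofList, List.mem_flatMap]
  constructor
  · rintro ⟨⟨k, v⟩, hkv, hc⟩
    simp only [List.mem_map, Prod.mk.injEq] at hc
    obtain ⟨c', hc', rfl, rfl⟩ := hc
    rwa [PySem.Dict.getD_of_mem_items d hkv hnd]
  · intro hc
    by_cases hcon : d.contains r = true
    · rw [PySem.Dict.contains_eq_isSome_get?] at hcon
      obtain ⟨v, hv⟩ := Option.isSome_iff_exists.1 hcon
      refine ⟨(r, v), PySem.Dict.mem_items_of_get?_eq_some d hv, ?_⟩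
      simp only [List.mem_map, Prod.mk.injEq]
      exact ⟨c, by rwa [PySem.Dict.getD_of_get?_eq_some d [] hv] at hc, trivial, rfl⟩
    · rw [PySem.Dict.getD_of_not_contains d [] (by simpa using hcon)] at hc
      simp at hc

-- ===== VERDICT (by name: the statement is the Claim_ definition above) =====
theorem is_touching_symbol_spec : Claim_equal_is_touching_symbol := by
  intro psp sp _
  unfold Spec_is_touching_symbol is_touching_symbol is_touching_symbol_alt
  set d1 := PySem.Dict.ofList psp with hd1
  set d2 := PySem.Dict.ofList sp with hd2
  have hnd1 : d1.keys.Nodup := PySem.Dict.nodup_keys_ofList psp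
  have hnd2 : d2.keys.Nodup := PySem.Dict.nodup_keys_ofList sp
  have key : (isTouchLoop d1 d2 d1.keys = true) ↔
      ((!(PySem.Set.inter (flatPairs d1) (flatPairs d2)).isEmpty) = true) := by
    rw [isTouchLoop_iff, Bool.not_eq_true', List.isEmpty_eq_false_iff_exists_mem]
    constructor
    · rintro ⟨row, _, c, h1, h2⟩
      exact ⟨(row, c), (PySem.Set.mem_inter _ _ _).2
        ⟨(mem_flatPairs d1 hnd1 row c).2 h1, (mem_flatPairs d2 hnd2 row c).2 h2⟩⟩
    · rintro ⟨⟨row, c⟩, hmem⟩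
      rw [PySem.Set.mem_inter] at hmem
      have h1 := (mem_flatPairs d1 hnd1 row c).1 hmem.1
      have h2 := (mem_flatPairs d2 hnd2 row c).1 hmem.2
      have hrow : row ∈ d1.keys := by
        by_contra hr
        rw [PySem.Dict.getD_of_not_contains d1 []
          (by rw [← Bool.not_eq_true]; exact fun hc => hr ((PySem.Dict.contains_iff_mem_keys d1 row).1 hc))] at h1
        simp at h1
      exact ⟨row, hrow, c, h1, h2⟩
  exact Bool.coe_iff_coe.1 key
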